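-- pv_equiv track=rewrite | github.com/dangtom700/StudyApp_V2_May18_2024 | source1/modules/DataProcess.py | get_word_list_from_file
-- ===== SOURCE A (Python) =====
-- def get_double_word_list_from_file(word_list: list[str]) -> set[str]:
--     two_word_tags = set()
--     for i in range(len(word_list) - 1):
--         tag = word_list[i] + "_" + word_list[i+1]
--         two_word_tags.add(tag)
--     return two_word_tags
--
-- def get_triple_word_list_from_file(word_list: list[str]) -> set[str]:
--     three_word_tags = set()
--     for i in range(len(word_list) - 2):
--         tag = word_list[i] + "_" + word_list[i+1] + "_" + word_list[i+2]
--         three_word_tags.add(tag)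
--     return three_word_tags
--
-- def get_word_list_from_file(filename: str, banned_words: set[str]) -> set[str]:
--     """
--     Generate a set of words from a given filename, excluding banned words and double words.
--
--     Parameters:
--         filename (str): The name of the file to extract words from.
--         banned_words (set[str]): A set of words that should be excluded from the generated word list.
--
--     Returns:
--         set[str]: A sorted set of words extracted from the filename, excluding banned words and double words.
--     """
--     words = filename.strip().split()
--     tuned_words = set(words)
--     double_words = get_double_word_list_from_file(words)
--     triple_words = get_triple_word_list_from_file(words)
--
--     tuned_words = tuned_words.union(double_words)
--     tuned_words = tuned_words.union(triple_words)
--     tuned_words = {word.replace("C++", "C_pp").replace("C#", "C_sharp") for word in tuned_words}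
--     tuned_words = tuned_words.difference(banned_words)
--     return sorted(tuned_words)
-- ===== SOURCE B (Python) =====
-- def get_word_list_from_file(filename: str, banned_words: set[str]) -> list[str]:
--     """No set data structure: collect every tag (with duplicates) by walking the
--     suffixes of the word list, sort the multiset, then a single scan drops
--     adjacent duplicates and banned words."""
--     words = filename.strip().split()
--     tags = []
--     rest = words
--     while rest:
--         tags.append(rest[0])
--         if len(rest) >= 2:
--             tags.append(rest[0] + "_" + rest[1])
--         if len(rest) >= 3:
--             tags.append(rest[0] + "_" + rest[1] + "_" + rest[2])
--         rest = rest[1:]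
--     cleaned = sorted(t.replace("C++", "C_pp").replace("C#", "C_sharp") for t in tags)
--     out = []
--     for t in cleaned:
--         if (not out or out[-1] != t) and t not in banned_words:
--             out.append(t)
--     return out
-- ===== Notes on version B (the rewrite author's own statement) =====
-- stated objective: alternative
-- what changed: Replaces A's hash-set pipeline (three n-gram scans, set unions, set comprehension, set difference, sorted) by a set-free multiset strategy: collect all tags with duplicates by walking list suffixes, sort once, then a single linear scan removes adjacent duplicates and banned words while building the output.
import Mathlib
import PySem

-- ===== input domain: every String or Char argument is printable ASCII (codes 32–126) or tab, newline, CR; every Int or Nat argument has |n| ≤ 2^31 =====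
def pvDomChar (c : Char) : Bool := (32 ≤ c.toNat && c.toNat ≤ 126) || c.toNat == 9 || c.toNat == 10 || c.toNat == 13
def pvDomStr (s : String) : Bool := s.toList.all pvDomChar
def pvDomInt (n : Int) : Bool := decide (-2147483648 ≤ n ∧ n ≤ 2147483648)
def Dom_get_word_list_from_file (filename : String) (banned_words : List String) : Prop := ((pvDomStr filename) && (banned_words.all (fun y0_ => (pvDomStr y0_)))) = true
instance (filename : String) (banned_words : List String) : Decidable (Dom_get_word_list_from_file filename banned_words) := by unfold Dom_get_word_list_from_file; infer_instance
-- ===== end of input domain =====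

-- B drops A's hash-set pipeline entirely: it collects every tag (with duplicates)
-- by walking list suffixes, sorts the multiset once, and one linear scan removes
-- adjacent duplicates and banned words (objective: alternative, same cost).

-- ===== PORT A =====
-- word_list[i]: the loop indices are always in range, so pyGetD with "" is exact here
def get_double_word_list_from_file (word_list : List String) : PySem.Set String :=
  (PySem.List.pyRange 0 ((word_list.length : Int) - 1) 1).foldl
    (fun s i => PySem.Set.add s
      (PySem.List.pyGetD word_list i "" ++ "_" ++ PySem.List.pyGetD word_list (i + 1) ""))
    PySem.Set.empty

def get_triple_word_list_from_file (word_list : List String) : PySem.Set String :=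
  (PySem.List.pyRange 0 ((word_list.length : Int) - 2) 1).foldl
    (fun s i => PySem.Set.add s
      (PySem.List.pyGetD word_list i "" ++ "_" ++ PySem.List.pyGetD word_list (i + 1) ""
        ++ "_" ++ PySem.List.pyGetD word_list (i + 2) ""))
    PySem.Set.empty

def get_word_list_from_file (filename : String) (banned_words : List String) : List String :=
  let words := PySem.Str.split₀ (PySem.Str.strip filename)
  let tuned_words := PySem.Set.ofList words
  let double_words := get_double_word_list_from_file words
  let triple_words := get_triple_word_list_from_file words
  let tuned_words := PySem.Set.union tuned_words double_words
  let tuned_words := PySem.Set.union tuned_words triple_words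
  let tuned_words := PySem.Set.ofList (tuned_words.map (fun word =>
    PySem.Str.replace (PySem.Str.replace word "C++" "C_pp") "C#" "C_sharp"))
  let tuned_words := PySem.Set.diff tuned_words banned_words
  PySem.List.sorted tuned_words (fun x => x) false

-- ===== PORT B =====
-- the while loop over rest = words, words[1:], … : structural recursion on the suffix
def pvCollectTags : List String → List String
  | [] => []
  | w :: rest =>
    [w] ++
    (match rest with | w2 :: _ => [w ++ "_" ++ w2] | [] => []) ++
    (match rest with | w2 :: w3 :: _ => [w ++ "_" ++ w2 ++ "_" ++ w3] | _ => []) ++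
    pvCollectTags rest

def pvRep (t : String) : String :=
  PySem.Str.replace (PySem.Str.replace t "C++" "C_pp") "C#" "C_sharp"

def get_word_list_from_file_alt (filename : String) (banned_words : List String) : List String :=
  let words := PySem.Str.split₀ (PySem.Str.strip filename)
  let cleaned := PySem.List.sorted ((pvCollectTags words).map pvRep) (fun x => x) false
  cleaned.foldl
    (fun out t => if out.getLast? ≠ some t ∧ t ∉ banned_words then out ++ [t] else out) []

-- ===== PRECONDITION & SPEC =====
def Spec_get_word_list_from_file (filename : String) (banned_words : List String) (out : List String) : Prop := out = get_word_list_from_file_alt filename banned_words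
instance (filename : String) (banned_words : List String) (out : List String) : Decidable (Spec_get_word_list_from_file filename banned_words out) := by unfold Spec_get_word_list_from_file; infer_instance

-- ===== CLAIM (what is proved, stated in full; the proofs are below) =====
def Claim_equal_get_word_list_from_file : Prop := ∀ (filename : String) (banned_words : List String), Dom_get_word_list_from_file filename banned_words → Spec_get_word_list_from_file filename banned_words (get_word_list_from_file filename banned_words)

-- ===== LEMMAS AND PROOFS =====

theorem pv_mem_foldA {α : Type} [DecidableEq α] (g : Int → α) (l : List Int) (s : PySem.Set α) (x : α) :
    x ∈ l.foldl (fun s i => PySem.Set.add s (g i)) s ↔ x ∈ s ∨ ∃ i ∈ l, x = g i := by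
  induction l generalizing s with
  | nil => simp
  | cons a t ih => simp [List.foldl, ih, PySem.Set.mem_add]; tauto

-- x ∈ ws ↔ x is ws[k] for some Nat index
theorem pv_mem_getD (ws : List String) (k : Nat) (h : k < ws.length) :
    PySem.List.pyGetD ws (k : Int) "" = ws[k] := by
  simp [PySem.List.pyGetD_natCast, List.getD_eq_getElem?_getD, h]

-- membership of B's duplicate tag list, in Nat-index form
theorem pv_mem_collect (ws : List String) (x : String) :
    x ∈ pvCollectTags ws ↔
      (∃ (i : Nat) (h : i < ws.length), x = ws[i]) ∨
      (∃ (i : Nat) (h : i + 1 < ws.length), x = ws[i] ++ "_" ++ ws[i+1]) ∨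
      (∃ (i : Nat) (h : i + 2 < ws.length), x = ws[i] ++ "_" ++ ws[i+1] ++ "_" ++ ws[i+2]) := by
  induction ws with
  | nil => simp [pvCollectTags]
  | cons w rest ih =>
    simp only [pvCollectTags, List.mem_append, ih]
    constructor
    · rintro (((h1 | h2) | h3) | (⟨i, hi, rfl⟩ | ⟨i, hi, rfl⟩ | ⟨i, hi, rfl⟩))
      · exact Or.inl ⟨0, by simpa using h1⟩
      · rcases rest with _ | ⟨w2, rest'⟩
        · simp at h2
        · simp only [List.mem_singleton] at h2
          exact Or.inr (Or.inl ⟨0, by simp, by simpa using h2⟩)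
      · rcases rest with _ | ⟨w2, _ | ⟨w3, rest'⟩⟩
        · simp at h3
        · simp at h3
        · simp only [List.mem_singleton] at h3
          exact Or.inr (Or.inr ⟨0, by simp, by simpa using h3⟩)
      · exact Or.inl ⟨i + 1, by simpa using hi, by simp⟩
      · exact Or.inr (Or.inl ⟨i + 1, by simpa using hi, by simp⟩)
      · exact Or.inr (Or.inr ⟨i + 1, by simpa using hi, by simp⟩)
    · rintro (⟨i, hi, rfl⟩ | ⟨i, hi, rfl⟩ | ⟨i, hi, rfl⟩)
      · cases i with
        | zero => exact Or.inl (Or.inl (Or.inl (by simp)))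
        | succ j => exact Or.inr (Or.inl ⟨j, by simpa using hi, by simp⟩)
      · cases i with
        | zero =>
          rcases rest with _ | ⟨w2, rest'⟩
          · simp at hi
          · exact Or.inl (Or.inl (Or.inr (by simp)))
        | succ j => exact Or.inr (Or.inr (Or.inl ⟨j, by simpa using hi, by simp⟩))
      · cases i with
        | zero =>
          rcases rest with _ | ⟨w2, _ | ⟨w3, rest'⟩⟩
          · simp at hi
          · simp at hi
          · exact Or.inl (Or.inr (by simp))
        | succ j => exact Or.inr (Or.inr (Or.inr ⟨j, by simpa using hi, by simp; try rfl⟩))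

-- A's unioned tag set has exactly the members of B's duplicate tag list
theorem pv_mem_union_iff_collect (ws : List String) (x : String) :
    x ∈ PySem.Set.union
        (PySem.Set.union (PySem.Set.ofList ws) (get_double_word_list_from_file ws))
        (get_triple_word_list_from_file ws) ↔ x ∈ pvCollectTags ws := by
  rw [pv_mem_collect, PySem.Set.mem_union, PySem.Set.mem_union, PySem.Set.mem_ofList,
    get_double_word_list_from_file, get_triple_word_list_from_file, pv_mem_foldA, pv_mem_foldA]
  simp only [PySem.Set.empty, List.not_mem_nil, false_or, PySem.List.mem_pyRange_one]
  constructor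
  · rintro ((h | ⟨i, ⟨h0, hlt⟩, rfl⟩) | ⟨i, ⟨h0, hlt⟩, rfl⟩)
    · rcases List.mem_iff_getElem.1 h with ⟨k, hk, rfl⟩
      exact Or.inl ⟨k, hk, rfl⟩
    · obtain ⟨k, rfl⟩ : ∃ k : Nat, i = (k : Int) := ⟨i.toNat, by omega⟩
      have hk : k + 1 < ws.length := by omega
      refine Or.inr (Or.inl ⟨k, hk, ?_⟩)
      rw [pv_mem_getD ws k (by omega), show (k : Int) + 1 = ((k+1 : Nat) : Int) by push_cast; ring,
        pv_mem_getD ws (k+1) hk]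
    · obtain ⟨k, rfl⟩ : ∃ k : Nat, i = (k : Int) := ⟨i.toNat, by omega⟩
      have hk : k + 2 < ws.length := by omega
      refine Or.inr (Or.inr ⟨k, hk, ?_⟩)
      rw [pv_mem_getD ws k (by omega), show (k : Int) + 1 = ((k+1 : Nat) : Int) by push_cast; ring,
        pv_mem_getD ws (k+1) (by omega), show (k : Int) + 2 = ((k+2 : Nat) : Int) by push_cast; ring,
        pv_mem_getD ws (k+2) hk]
  · rintro (⟨i, hi, rfl⟩ | ⟨i, hi, rfl⟩ | ⟨i, hi, rfl⟩)
    · exact Or.inl (Or.inl (List.getElem_mem hi))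
    · refine Or.inl (Or.inr ⟨(i : Int), ⟨by positivity, by omega⟩, ?_⟩)
      rw [pv_mem_getD ws i (by omega), show (i : Int) + 1 = ((i+1 : Nat) : Int) by push_cast; ring,
        pv_mem_getD ws (i+1) hi]
    · refine Or.inr ⟨(i : Int), ⟨by positivity, by omega⟩, ?_⟩
      rw [pv_mem_getD ws i (by omega), show (i : Int) + 1 = ((i+1 : Nat) : Int) by push_cast; ring,
        pv_mem_getD ws (i+1) (by omega), show (i : Int) + 2 = ((i+2 : Nat) : Int) by push_cast; ring,
        pv_mem_getD ws (i+2) hi]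

-- in a strictly increasing list every member is ≤ the last element
theorem pv_le_getLast : ∀ (l : List String), l.Pairwise (· < ·) → ∀ y ∈ l, ∀ m, l.getLast? = some m → y ≤ m
  | [] => by simp
  | [a] => by
      intro _ y hy m hm
      simp only [List.mem_singleton] at hy
      simp only [List.getLast?_singleton, Option.some.injEq] at hm
      subst hy; subst hm; exact le_refl _
  | a :: b :: t => by
      intro hp y hy m hm
      rw [List.getLast?_cons_cons] at hm
      rcases List.mem_cons.1 hy with rfl | hy'
      · have hab : y < b := (List.pairwise_cons.1 hp).1 b (by simp)
        have hbm : b ≤ m := pv_le_getLast (b :: t) (List.pairwise_cons.1 hp).2 b (by simp) m hm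
        exact le_of_lt (lt_of_lt_of_le hab hbm)
      · exact pv_le_getLast (b :: t) (List.pairwise_cons.1 hp).2 y hy' m hm

-- the dedup-and-filter scan over a (≤)-sorted list: result is strictly increasing and
-- contains exactly the non-banned elements
theorem pv_scan (banned : List String) :
    ∀ (L acc : List String), L.Pairwise (· ≤ ·) → acc.Pairwise (· < ·) →
      (∀ y ∈ acc, ∀ t ∈ L, y ≤ t) →
      (L.foldl (fun out t => if out.getLast? ≠ some t ∧ t ∉ banned then out ++ [t] else out)
          acc).Pairwise (· < ·) ∧
      (∀ x, x ∈ L.foldl (fun out t => if out.getLast? ≠ some t ∧ t ∉ banned then out ++ [t] else out) acc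
        ↔ x ∈ acc ∨ (x ∈ L ∧ x ∉ banned)) := by
  intro L
  induction L with
  | nil => intro acc _ hacc _; simpa using hacc
  | cons t L' ih =>
    intro acc hs hacc hch
    have hs' : L'.Pairwise (· ≤ ·) := (List.pairwise_cons.1 hs).2
    have htle : ∀ u ∈ L', t ≤ u := (List.pairwise_cons.1 hs).1
    simp only [List.foldl_cons]
    by_cases hc : acc.getLast? ≠ some t ∧ t ∉ banned
    · rw [if_pos hc]
      have hlt : ∀ y ∈ acc, y < t := by
        intro y hy
        have hle := hch y hy t (by simp)
        rcases lt_or_eq_of_le hle with h | rfl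
        · exact h
        · exfalso
          rcases hgl : acc.getLast? with _ | m
          · rw [List.getLast?_eq_none_iff] at hgl; subst hgl; simp at hy
          · have hmem : m ∈ acc := List.mem_of_getLast? hgl
            have h1 : y ≤ m := pv_le_getLast acc hacc y hy m hgl
            have h2 : m ≤ y := hch m hmem y (by simp)
            exact hc.1 (by rw [hgl, le_antisymm h2 h1])
      have hacc' : (acc ++ [t]).Pairwise (· < ·) := by
        rw [List.pairwise_append]
        exact ⟨hacc, by simp, by simpa using hlt⟩
      have hch' : ∀ y ∈ acc ++ [t], ∀ u ∈ L', y ≤ u := by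
        intro y hy u hu
        rcases List.mem_append.1 hy with hy | hy
        · exact hch y hy u (by simp [hu])
        · rw [List.mem_singleton] at hy; subst hy; exact htle u hu
      obtain ⟨h1, h2⟩ := ih (acc ++ [t]) hs' hacc' hch'
      refine ⟨h1, fun x => ?_⟩
      rw [h2 x]
      simp only [List.mem_append, List.mem_cons, List.not_mem_nil, or_false]
      constructor
      · rintro ((hx | rfl) | ⟨hx, hb⟩)
        · exact Or.inl hx
        · exact Or.inr ⟨Or.inl rfl, hc.2⟩
        · exact Or.inr ⟨Or.inr hx, hb⟩
      · rintro (hx | ⟨(rfl | hx), hb⟩)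
        · exact Or.inl (Or.inl hx)
        · exact Or.inl (Or.inr rfl)
        · exact Or.inr ⟨hx, hb⟩
    · rw [if_neg hc]
      obtain ⟨h1, h2⟩ := ih acc hs' hacc (fun y hy u hu => hch y hy u (by simp [hu]))
      refine ⟨h1, fun x => ?_⟩
      rw [h2 x]
      simp only [List.mem_cons]
      push_neg at hc
      constructor
      · rintro (hx | ⟨hx, hb⟩)
        · exact Or.inl hx
        · exact Or.inr ⟨Or.inr hx, hb⟩
      · rintro (hx | ⟨(rfl | hx), hb⟩)
        · exact Or.inl hx
        · -- t was skipped: either banned (contradiction with hb) or already the last of acc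
          have hl : acc.getLast? = some x := by
            by_contra hne
            exact hb (hc hne)
          exact Or.inl (List.mem_of_getLast? hl)
        · exact Or.inr ⟨hx, hb⟩

-- ===== VERDICT (by name: the statement is the Claim_ definition above) =====
theorem get_word_list_from_file_spec : Claim_equal_get_word_list_from_file := by
  intro filename banned _
  show get_word_list_from_file filename banned = get_word_list_from_file_alt filename banned
  unfold get_word_list_from_file get_word_list_from_file_alt
  simp only
  set ws := PySem.Str.split₀ (PySem.Str.strip filename) with hws
  set L := PySem.List.sorted ((pvCollectTags ws).map pvRep) (fun x => x) false with hL
  have hsorted : L.Pairwise (· ≤ ·) := by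
    simpa using PySem.List.sorted_pairwise ((pvCollectTags ws).map pvRep) (fun x => x)
  obtain ⟨hp, hm⟩ := pv_scan banned L [] hsorted (by simp) (by simp)
  apply PySem.List.sorted_eq_of_perm_of_pairwise_lt
  · refine (List.perm_ext_iff_of_nodup (hp.imp (fun h => ne_of_lt h))
      (PySem.Set.nodup_diff _ _ (PySem.Set.nodup_ofList _))).2 fun x => ?_
    rw [hm x]
    simp only [List.not_mem_nil, false_or, PySem.Set.mem_diff, hL, PySem.List.mem_sorted,
      List.mem_map, PySem.Set.mem_ofList]
    constructor
    · rintro ⟨⟨a, ha, rfl⟩, hb⟩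
      exact ⟨⟨a, (pv_mem_union_iff_collect ws a).2 ha, rfl⟩, hb⟩
    · rintro ⟨⟨a, ha, rfl⟩, hb⟩
      exact ⟨⟨a, (pv_mem_union_iff_collect ws a).1 ha, rfl⟩, hb⟩
  · simpa using hp
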